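-- pv_equiv track=rewrite | github.com/S0S-90/useful_scripts | mathematical_function_collection.py | zahlen_links_unten
-- ===== SOURCE A (Python) =====
-- def zahlen_links_unten(seitenlaenge):
--     """gibt die Zahlen der Diagonalenhälfte links unten aus einer spiralförmigen Zahlenmatrix der Seitenlänge seitenlaenge als Liste aus (ohne 1)"""
--     anzahl = int((seitenlaenge-1)/2)
--     zahl = 1
--     summand = 6
--     zahlen = []
--     for i in range(anzahl):
--         zahl = zahl + summand
--         zahlen.append(zahl)
--         summand = summand + 8
--     return zahlen
-- ===== SOURCE B (Python) =====
-- def zahlen_links_unten(seitenlaenge):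
--     """gibt die Zahlen der Diagonalenhaelfte links unten aus einer spiralfoermigen Zahlenmatrix der Seitenlaenge seitenlaenge als Liste aus (ohne 1)"""
--     anzahl = int((seitenlaenge-1)/2)
--     return [4*i*i + 10*i + 7 for i in range(anzahl)]
-- ===== Notes on version B (the rewrite author's own statement) =====
-- stated objective: simpler
-- what changed: Replaces the loop that carries running zahl/summand accumulators with a closed-form quadratic 4*i*i+10*i+7 emitted by a list comprehension over the same index range.
import Mathlib
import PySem

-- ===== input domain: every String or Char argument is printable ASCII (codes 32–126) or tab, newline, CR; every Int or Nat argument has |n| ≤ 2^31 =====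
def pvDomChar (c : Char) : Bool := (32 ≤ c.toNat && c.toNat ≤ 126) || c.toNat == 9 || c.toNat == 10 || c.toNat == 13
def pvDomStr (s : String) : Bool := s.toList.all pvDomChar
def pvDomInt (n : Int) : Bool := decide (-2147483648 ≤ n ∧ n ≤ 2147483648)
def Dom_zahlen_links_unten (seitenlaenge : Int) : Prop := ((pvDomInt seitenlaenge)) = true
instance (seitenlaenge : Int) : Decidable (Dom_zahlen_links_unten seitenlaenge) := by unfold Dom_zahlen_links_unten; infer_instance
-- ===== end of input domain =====

-- B replaces A's running zahl/summand accumulators with the closed-form term 4*i*i+10*i+7 per index (objective: simpler).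

-- ===== PORT A =====
-- int((seitenlaenge-1)/2): float division then truncation toward zero; exact on |seitenlaenge| ≤ 2^31, so ported as Int.tdiv (truncating division).
def zahlen_links_unten (seitenlaenge : Int) : List Int :=
  let anzahl : Int := (seitenlaenge - 1).tdiv 2
  (((PySem.List.pyRange 0 anzahl 1).foldl
      (fun (st : Int × Int × List Int) _i =>
        let zahl := st.1 + st.2.1
        (zahl, st.2.1 + 8, st.2.2 ++ [zahl]))
      (1, 6, [])).2.2)

-- ===== PORT B =====
-- same anzahl expression (exact on the domain, see above), then a comprehension over range(anzahl)
def zahlen_links_unten_alt (seitenlaenge : Int) : List Int :=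
  (PySem.List.pyRange 0 ((seitenlaenge - 1).tdiv 2) 1).map (fun i => 4*i*i + 10*i + 7)

-- ===== PRECONDITION & SPEC =====
def Spec_zahlen_links_unten (seitenlaenge : Int) (out : List Int) : Prop := out = zahlen_links_unten_alt seitenlaenge
instance (seitenlaenge : Int) (out : List Int) : Decidable (Spec_zahlen_links_unten seitenlaenge out) := by unfold Spec_zahlen_links_unten; infer_instance

-- ===== CLAIM (what is proved, stated in full; the proofs are below) =====
def Claim_equal_zahlen_links_unten : Prop := ∀ (seitenlaenge : Int), Dom_zahlen_links_unten seitenlaenge → Spec_zahlen_links_unten seitenlaenge (zahlen_links_unten seitenlaenge)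

-- ===== LEMMAS AND PROOFS =====

-- loop invariant: starting from (4a²+2a+1, 8a+6, acc), folding over range a..a+n appends 4i²+10i+7 for each i
lemma zlu_loop (n : Nat) : ∀ (a : Int) (acc : List Int),
    (((PySem.List.pyRange a (a + n) 1).foldl
        (fun (st : Int × Int × List Int) _i =>
          let zahl := st.1 + st.2.1
          (zahl, st.2.1 + 8, st.2.2 ++ [zahl]))
        (4*a*a + 2*a + 1, 8*a + 6, acc)).2.2)
      = acc ++ (PySem.List.pyRange a (a + n) 1).map (fun i => 4*i*i + 10*i + 7) := by
  induction n with
  | zero =>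
      intro a acc
      simp
  | succ n ih =>
      intro a acc
      have hcons := PySem.List.pyRange_one_cons (a := a) (b := a + (n+1 : Nat)) (by push_cast; omega)
      rw [hcons]
      simp only [List.foldl_cons, List.map_cons]
      have hb : a + ((n+1 : Nat) : Int) = (a+1) + (n : Nat) := by push_cast; omega
      rw [hb]
      rw [show (4*a*a + 2*a + 1 + (8*a + 6) : Int) = 4*a*a + 10*a + 7 by ring]
      have H := ih (a+1) (acc ++ [4*a*a + 10*a + 7])
      rw [show (4*(a+1)*(a+1) + 2*(a+1) + 1 : Int) = 4*a*a + 10*a + 7 by ring,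
          show (8*(a+1) + 6 : Int) = 8*a + 6 + 8 by ring] at H
      rw [H]
      simp

-- ===== VERDICT (by name: the statement is the Claim_ definition above) =====
theorem zahlen_links_unten_spec : Claim_equal_zahlen_links_unten := by
  intro s _
  unfold Spec_zahlen_links_unten zahlen_links_unten zahlen_links_unten_alt
  set m : Int := (s - 1).tdiv 2 with hm
  by_cases h : m ≤ 0
  · simp [PySem.List.pyRange_one_eq_nil h]
  · have h0 : (0:Int) + (m.toNat : Int) = m := by omega
    have := zlu_loop m.toNat 0 []
    simp only [h0] at this
    norm_num at this ⊢
    rw [this]
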